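-- pv_equiv track=rewrite | github.com/pchiragiev/Foxes-78-Paul-Week4-Day3 | white_board.py | norepeatingletters
-- ===== SOURCE A (Python) =====
-- def norepeatingletters(s):
--     p = []
--     s2 = set()
--     for c in s:
--         if c in s2:
--             p.append("_")
--         else:
--             p.append(c)
--             s2.add(c)
--     return ''.join(p)
-- ===== SOURCE B (Python) =====
-- def norepeatingletters(s):
--     # Head-and-mask loop: strip the leading run of underscores into the output,
--     # then take the next character, blank out all its later occurrences in the
--     # remainder with str.replace, and repeat. No seen-set is maintained.
--     out = []
--     rest = s
--     while rest:
--         stripped = rest.lstrip("_")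
--         out.append("_" * (len(rest) - len(stripped)))
--         if not stripped:
--             break
--         head = stripped[0]
--         out.append(head)
--         rest = stripped[1:].replace(head, "_")
--     return "".join(out)
-- ===== Notes on version B (the rewrite author's own statement) =====
-- stated objective: alternative
-- what changed: B replaces A's per-character seen-set pass by a head-and-mask loop: it bulk-moves the leading run of underscores into the output, takes the next character, blanks every later occurrence of it in the remainder with str.replace, and repeats; no seen-set is maintained and only O(distinct chars) Python-level iterations run.
import Mathlib
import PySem

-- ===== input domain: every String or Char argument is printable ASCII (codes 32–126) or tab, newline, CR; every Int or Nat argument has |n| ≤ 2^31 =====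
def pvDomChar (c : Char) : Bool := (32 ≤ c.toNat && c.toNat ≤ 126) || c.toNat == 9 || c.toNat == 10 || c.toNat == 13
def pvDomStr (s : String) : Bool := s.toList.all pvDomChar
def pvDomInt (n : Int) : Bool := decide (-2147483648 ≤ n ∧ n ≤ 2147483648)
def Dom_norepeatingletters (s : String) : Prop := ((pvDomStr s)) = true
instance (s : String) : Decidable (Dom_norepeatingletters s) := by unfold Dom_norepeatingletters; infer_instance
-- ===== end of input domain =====

-- B replaces A's stateful seen-set pass by a head-and-mask loop (move the leading '_'
-- run to the output, keep the head, blank its later occurrences with replace, repeat).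

-- ===== PORT A =====
-- A's for-loop: state (p, s2); p appended to, s2 a Python set of chars seen so far.
def norepeatinglettersLoop : List Char → List Char → PySem.Set Char → List Char
  | [], p, _ => p
  | c :: cs, p, s2 =>
    if PySem.Set.contains s2 c then norepeatinglettersLoop cs (p ++ ['_']) s2
    else norepeatinglettersLoop cs (p ++ [c]) (PySem.Set.add s2 c)

def norepeatingletters (s : String) : String :=
  String.mk (norepeatinglettersLoop s.toList [] PySem.Set.empty)

-- ===== PORT B =====
-- Source B's while loop, state (out, rest): strip the leading run of '_' into out,
-- then append the head and mask its later occurrences; `stripped[1:].replace(head, "_")`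
-- with single-character old/new is exactly the character-wise substitution below (exact).
def norepeatinglettersAltGo (out rest : List Char) : List Char :=
  match h : rest.dropWhile (fun x => x = '_') with
  | [] => out ++ List.replicate (rest.length - (rest.dropWhile (fun x => x = '_')).length) '_'
  | c :: cs =>
      norepeatinglettersAltGo
        (out ++ List.replicate (rest.length - (rest.dropWhile (fun x => x = '_')).length) '_' ++ [c])
        (cs.map (fun x => if x = c then '_' else x))
termination_by rest.length
decreasing_by
  simp only [List.length_map]
  have h1 := List.length_dropWhile_le (fun x => x = '_') rest
  rw [h] at h1
  simp at h1
  omega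

def norepeatingletters_alt (s : String) : String :=
  String.mk (norepeatinglettersAltGo [] s.toList)

-- ===== PRECONDITION & SPEC =====
def Spec_norepeatingletters (s : String) (out : String) : Prop := out = norepeatingletters_alt s
instance (s : String) (out : String) : Decidable (Spec_norepeatingletters s out) := by unfold Spec_norepeatingletters; infer_instance

-- ===== CLAIM =====
def Claim_equal_norepeatingletters : Prop := ∀ (s : String), Dom_norepeatingletters s → Spec_norepeatingletters s (norepeatingletters s)

-- ===== LEMMAS AND PROOFS =====

-- proof helper: the one-character-per-step version of B's head-and-mask loop
def pvSimpleGo : List Char → List Char → List Char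
  | out, [] => out
  | out, c :: cs => pvSimpleGo (out ++ [c]) (cs.map (fun x => if x = c then '_' else x))
termination_by _ rest => rest.length
decreasing_by simp

-- A mask over a seen-set followed by masking one more character is the mask over the grown set.
lemma norepeatingletters_mask_step (cs : List Char) (S : PySem.Set Char) (c : Char)
    (hc : c ∉ S) :
    (cs.map (fun x => if x ∈ S then '_' else x)).map (fun x => if x = c then '_' else x)
      = cs.map (fun x => if x ∈ PySem.Set.add S c then '_' else x) := by
  rw [List.map_map]
  refine List.map_congr_left ?_
  intro x _
  simp only [Function.comp]
  by_cases h1 : x ∈ S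
  · have h2 : x ∈ PySem.Set.add S c := (PySem.Set.mem_add S c x).mpr (Or.inl h1)
    simp [h1, h2]
  · by_cases h3 : x = c
    · have h2 : x ∈ PySem.Set.add S c := (PySem.Set.mem_add S c x).mpr (Or.inr h3)
      subst h3
      simp [h1]
    · have h2 : x ∉ PySem.Set.add S c := by
        intro hx
        rcases (PySem.Set.mem_add S c x).mp hx with h | h
        · exact h1 h
        · exact h3 h
      simp [h1, h2, h3]

-- Masking the underscore itself changes nothing.
lemma norepeatingletters_mask_underscore (t : List Char) :
    t.map (fun x => if x = '_' then '_' else x) = t := by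
  refine (List.map_congr_left ?_).trans (List.map_id _)
  intro x _
  by_cases h : x = '_' <;> simp [h]

-- Invariant: A's loop with seen-set S is the one-step head-and-mask loop on the
-- list with the already-seen characters masked out.
lemma norepeatingletters_key : ∀ (l : List Char) (S : PySem.Set Char) (p : List Char),
    norepeatinglettersLoop l p S =
      pvSimpleGo p (l.map (fun x => if x ∈ S then '_' else x)) := by
  intro l
  induction l with
  | nil => intro S p; simp [norepeatinglettersLoop, pvSimpleGo]
  | cons c cs ih =>
    intro S p
    by_cases hc : c ∈ S
    · have hcb : PySem.Set.contains S c = true := (PySem.Set.contains_iff S c).mpr hc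
      rw [norepeatinglettersLoop, if_pos hcb, ih S (p ++ ['_'])]
      simp only [List.map_cons, hc, if_true, pvSimpleGo,
        norepeatingletters_mask_underscore]
    · have hcb : ¬ PySem.Set.contains S c = true := fun h =>
        hc ((PySem.Set.contains_iff S c).mp h)
      rw [norepeatinglettersLoop, if_neg hcb, ih (PySem.Set.add S c) (p ++ [c])]
      simp only [List.map_cons, hc, if_false, pvSimpleGo,
        norepeatingletters_mask_step cs S c hc]

-- The one-step loop walks through a run of underscores by appending them one at a time.
lemma pvSimpleGo_underscores (j : Nat) : ∀ (out z : List Char),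
    pvSimpleGo out (List.replicate j '_' ++ z) = pvSimpleGo (out ++ List.replicate j '_') z := by
  induction j with
  | zero => intro out z; simp
  | succ n ih =>
    intro out z
    rw [List.replicate_succ, List.cons_append, pvSimpleGo,
      norepeatingletters_mask_underscore, ih (out ++ ['_']) z]
    simp

-- A list all of whose elements are '_' is a replicate.
lemma pvAllUnderscore (t : List Char) (h : ∀ x ∈ t, x = '_') :
    t = List.replicate t.length '_' := by
  refine List.eq_replicate_of_mem ?_
  exact h

-- B's bulk loop equals the one-step loop.
lemma norepeatingletters_bulk : ∀ (n : Nat) (rest out : List Char), rest.length ≤ n →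
    pvSimpleGo out rest = norepeatinglettersAltGo out rest := by
  intro n
  induction n with
  | zero =>
    intro rest out hn
    have h0 : rest = [] := List.eq_nil_of_length_eq_zero (Nat.le_zero.mp hn)
    subst h0
    rw [norepeatinglettersAltGo]
    simp [pvSimpleGo]
  | succ n ih =>
    intro rest out hn
    have hsplit := List.takeWhile_append_dropWhile (p := fun x => x = '_') (l := rest)
    have htw : rest.takeWhile (fun x => x = '_')
        = List.replicate (rest.takeWhile (fun x => x = '_')).length '_' := by
      refine pvAllUnderscore _ ?_
      intro x hx
      have := List.mem_takeWhile_imp hx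
      simpa using this
    rw [norepeatinglettersAltGo]
    split
    · rename_i h
      have hrest : rest = List.replicate (rest.takeWhile (fun x => x = '_')).length '_' := by
        conv_lhs => rw [← hsplit, h]
        simp [← htw]
      rw [hrest] at hn ⊢
      rw [show (List.replicate (rest.takeWhile (fun x => x = '_')).length '_' : List Char)
          = List.replicate (rest.takeWhile (fun x => x = '_')).length '_' ++ [] by simp,
        pvSimpleGo_underscores]
      simp [pvSimpleGo]
    · rename_i c cs h
      have hrest : rest = List.replicate (rest.takeWhile (fun x => x = '_')).length '_' ++ (c :: cs) := by
        conv_lhs => rw [← hsplit, h]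
        rw [← htw]
      have hlen : cs.length < rest.length := by
        rw [hrest]; simp; omega
      rw [hrest, pvSimpleGo_underscores, pvSimpleGo,
        ih (cs.map (fun x => if x = c then '_' else x)) _ (by simp; omega)]
      have hne : ¬ c = '_' := by
        have h2 := List.head_dropWhile_not (fun x => decide (x = '_')) (l := rest)
          (by simp [h])
        simp only [h, List.head_cons] at h2
        simpa using h2
      have hcount : rest.length - (c :: cs).length
          = (List.takeWhile (fun x => decide (x = '_')) rest).length := by
        rw [hrest]; simp [hne]
      congr 1
      rw [← hrest, h, hcount]

-- ===== VERDICT =====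
theorem norepeatingletters_spec : Claim_equal_norepeatingletters := by
  intro s _
  unfold Spec_norepeatingletters norepeatingletters norepeatingletters_alt
  have h : s.toList.map (fun x => if x ∈ PySem.Set.empty then '_' else x) = s.toList := by
    refine (List.map_congr_left ?_).trans (List.map_id _)
    intro x _
    simp [PySem.Set.empty]
  rw [norepeatingletters_key s.toList PySem.Set.empty [], h,
    norepeatingletters_bulk s.toList.length _ _ le_rfl]
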